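-- pv_equiv track=rewrite | github.com/jerry609/PaperBot | src/paperbot/repro/nodes/blueprint_node.py | _infer_data_flow
-- ===== SOURCE A (Python) =====
-- from typing import Any, Optional, List, Dict
--
-- def _infer_data_flow(
--
--     hierarchy: Dict[str, List[str]]
-- ) -> List[tuple]:
--     """Infer data flow from module hierarchy."""
--     flow = []
--
--     # Input to first module
--     if "model" in hierarchy:
--         components = hierarchy["model"]
--         flow.append(("input", components[0] if components else "model"))
--
--         # Sequential flow through components
--         for i in range(len(components) - 1):
--             flow.append((components[i], components[i + 1]))
--
--         # Last component to output
--         if components: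
--             flow.append((components[-1], "output"))
--
--     return flow
-- ===== SOURCE B (Python) =====
-- def _infer_data_flow(hierarchy):
--     """Infer data flow from module hierarchy."""
--     if "model" not in hierarchy:
--         return []
--     components = hierarchy["model"]
--     if not components:
--         # no components: connect the input to the model node itself
--         return [("input", "model")]
--
--     def chain(prev, comps):
--         # recursively thread the previous node through the components;
--         # the base case closes the chain with the output edge
--         if not comps:
--             return [(prev, "output")]
--         return [(prev, comps[0])] + chain(comps[0], comps[1:])
--
--     return chain("input", components)
-- ===== Notes on version B (the rewrite author's own statement) =====
-- stated objective: alternative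
-- what changed: Replaces A's three-stage construction (head edge append, index loop over range(len-1), conditional tail edge) with a structural recursion that threads the previous node through the component list, emitting the output edge in the base case.
import Mathlib
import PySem

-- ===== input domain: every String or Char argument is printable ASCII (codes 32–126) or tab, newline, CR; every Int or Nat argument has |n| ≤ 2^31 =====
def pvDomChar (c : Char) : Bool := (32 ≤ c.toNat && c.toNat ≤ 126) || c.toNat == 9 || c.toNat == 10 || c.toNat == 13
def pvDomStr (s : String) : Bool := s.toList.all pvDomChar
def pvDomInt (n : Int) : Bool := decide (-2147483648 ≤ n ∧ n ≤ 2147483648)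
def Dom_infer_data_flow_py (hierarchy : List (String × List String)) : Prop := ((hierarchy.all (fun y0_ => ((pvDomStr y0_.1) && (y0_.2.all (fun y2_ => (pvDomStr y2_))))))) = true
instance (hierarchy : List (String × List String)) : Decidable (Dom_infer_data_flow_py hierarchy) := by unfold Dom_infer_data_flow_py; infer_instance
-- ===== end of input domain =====

-- B replaces A's three-stage edge construction (head append + index loop + tail append)
-- with a structural recursion threading the previous node; same return value everywhere.


-- ===== PORT A =====
def infer_data_flow_py (hierarchy : List (String × List String)) : List (String × String) :=
  -- flow = []; if "model" in hierarchy: … ; return flow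
  match hierarchy.find? (fun p => p.1 == "model") with
  | none => []
  | some p =>
    let components := p.2
    -- flow.append(("input", components[0] if components else "model"))
    let flow : List (String × String) :=
      [("input", if components.isEmpty then "model" else PySem.List.pyGetD components 0 "")]
    -- for i in range(len(components) - 1): flow.append((components[i], components[i+1]))
    let flow := (PySem.List.pyRange 0 ((components.length : Int) - 1) 1).foldl
      (fun acc i => acc ++ [(PySem.List.pyGetD components i "", PySem.List.pyGetD components (i + 1) "")]) flow
    -- if components: flow.append((components[-1], "output"))
    if components.isEmpty then flow
    else flow ++ [(PySem.List.pyGetD components (-1) "", "output")]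

-- ===== PORT B =====
-- helper 'chain' of Source B: thread the previous node through the components,
-- closing with the output edge in the base case
def pvChain (prev : String) (comps : List String) : List (String × String) :=
  match comps with
  | [] => [(prev, "output")]
  | c :: rest => [(prev, c)] ++ pvChain c rest

def infer_data_flow_py_alt (hierarchy : List (String × List String)) : List (String × String) :=
  match hierarchy.find? (fun p => p.1 == "model") with
  | none => []
  | some p =>
    match p.2 with
    | [] => [("input", "model")]
    | c :: rest => pvChain "input" (c :: rest)

-- ===== PRECONDITION & SPEC =====
def Spec_infer_data_flow_py (hierarchy : List (String × List String)) (out : List (String × String)) : Prop := out = infer_data_flow_py_alt hierarchy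
instance (hierarchy : List (String × List String)) (out : List (String × String)) : Decidable (Spec_infer_data_flow_py hierarchy out) := by unfold Spec_infer_data_flow_py; infer_instance

-- ===== CLAIM (what is proved, stated in full; the proofs are below) =====
def Claim_equal_infer_data_flow_py : Prop := ∀ (hierarchy : List (String × List String)), Dom_infer_data_flow_py hierarchy → Spec_infer_data_flow_py hierarchy (infer_data_flow_py hierarchy)

-- ===== LEMMAS AND PROOFS =====

-- A's index loop, as a map over Nat range, yields the adjacent pairs of the list.
lemma adjMap (comps : List String) :
    (List.range (comps.length - 1)).map
      (fun k => (comps.getD k "", comps.getD (k + 1) "")) = comps.zip comps.tail := by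
  induction comps with
  | nil => simp
  | cons c rest ih =>
    cases rest with
    | nil => simp
    | cons d t =>
      simp only [List.length_cons, Nat.add_sub_cancel, List.range_succ_eq_map,
        List.map_cons, List.map_map, List.zip_cons_cons, List.tail_cons]
      have h0 : ((c :: d :: t).getD 0 "", (c :: d :: t).getD (0 + 1) "") = (c, d) := by
        simp [List.getD]
      have htail : List.map ((fun k => ((c :: d :: t).getD k "", (c :: d :: t).getD (k + 1) "")) ∘ Nat.succ)
          (List.range t.length) =
          List.map (fun k => ((d :: t).getD k "", (d :: t).getD (k + 1) "")) (List.range t.length) := by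
        apply List.map_congr_left
        intro k _
        simp [Function.comp, List.getD]
      rw [h0, htail]
      exact congrArg (List.cons (c, d)) (by simpa using ih)

-- B's recursion, characterised: the chain from prev is the edge to the head,
-- then the adjacent pairs, then the closing edge from the last component.
lemma chainEq (y : String) : ∀ (l : List String) (prev : String) (h : l ≠ []),
    pvChain prev l = (prev, l.headI) :: (l.zip l.tail ++ [(l.getLast h, "output")]) := by
  intro l
  induction l with
  | nil => intro _ h; exact absurd rfl h
  | cons c rest ih =>
    intro prev _
    cases rest with
    | nil => simp [pvChain]
    | cons d t =>
      rw [show pvChain prev (c :: d :: t) = (prev, c) :: pvChain c (d :: t) from rfl,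
        ih c (by simp)]
      simp [List.getLast]

-- ===== VERDICT (by name: the statement is the Claim_ definition above) =====
theorem infer_data_flow_py_spec : Claim_equal_infer_data_flow_py := by
  intro hierarchy _
  unfold Spec_infer_data_flow_py infer_data_flow_py infer_data_flow_py_alt
  cases hfind : hierarchy.find? (fun p => p.1 == "model") with
  | none => rfl
  | some p =>
    simp only
    cases hc : p.2 with
    | nil => simp [PySem.List.pyRange_one_eq_nil]
    | cons c rest =>
      have hne : c :: rest ≠ [] := by simp
      simp only [List.isEmpty_cons, if_neg (by decide : ¬ (false = true))]
      rw [PySem.List.foldl_append_singleton_eq_map]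
      rw [PySem.List.pyRange_one]
      have hb : (((c :: rest).length : Int) - 1 - 0).toNat = (c :: rest).length - 1 := by
        simp
      rw [hb, List.map_map]
      have hmap : (List.range ((c :: rest).length - 1)).map
          ((fun i => (PySem.List.pyGetD (c :: rest) i "", PySem.List.pyGetD (c :: rest) (i + 1) "")) ∘
            (fun k : Nat => (0 : Int) + k)) =
          (List.range ((c :: rest).length - 1)).map
            (fun k => ((c :: rest).getD k "", (c :: rest).getD (k + 1) "")) := by
        apply List.map_congr_left
        intro k _
        have h1 : (0 : Int) + (k : Int) = ((k : Nat) : Int) := by omega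
        have h2 : (k : Int) + 1 = (((k + 1 : Nat)) : Int) := by push_cast; ring
        simp only [Function.comp, h1, h2, PySem.List.pyGetD_natCast]
      rw [hmap, adjMap]
      rw [PySem.List.pyGetD_neg_one (c :: rest) "" hne]
      rw [chainEq "output" (c :: rest) "input" hne]
      simp [PySem.List.pyGetD_zero_cons, List.getLast]
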